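-- pv_equiv track=rewrite | github.com/lechP/aoc24-python | solutions/day15/solution_day15.py | solution_day15
-- ===== SOURCE A (Python) =====
-- def split_input(data: str):
--     grid, steps = data.split("\n\n")
--     grid = grid.split("\n")
--     steps = steps.replace("\n","")
--     return grid, steps
--
-- def parse_input(data: str):
--     grid, steps = split_input(data)
--
--     objects = {}
--     botpos = None
--
--     rows = len(grid)
--     cols = len(grid[0])
--
--     for i in range(rows):
--         for j in range(cols):
--             if grid[i][j] in [box, wall]:
--                 objects[(i, j)] = grid[i][j]
--             if grid[i][j] == bot:
--                 botpos = (i, j)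
--
--     return objects, botpos, steps
--
-- directions = {
--     ">": (0, 1),
--     "<": (0, -1),
--     "^": (-1, 0),
--     "v": (1, 0)
-- }
--
-- wall = '#'
--
-- box = 'O'
--
-- bot = '@'
--
-- def solution_day15(data) -> int:
--     objects, botpos, steps = parse_input(data)
--     for step in steps:
--         move = directions[step]
--         newpos = (botpos[0] + move[0], botpos[1] + move[1])
--         if newpos in objects:
--             objnewpos = newpos
--             no_walls = True
--             while objnewpos in objects and no_walls:
--                 if objects[objnewpos] == wall:
--                     no_walls = False
--                 objnewpos = (objnewpos[0] + move[0], objnewpos[1] + move[1])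
--             if no_walls:
--                 botpos = newpos
--                 objects.pop(newpos)
--                 objects[objnewpos] = box
--         else:
--             botpos = newpos
--
--     # print_grid(objects, botpos)
--
--     return count_gps(objects, box)
--
-- def count_gps(objects: dict[tuple[int, int], str], shape: str) -> int:
--     _sum = 0
--     for (i, j) in objects:
--         if objects[(i, j)] == shape:
--             _sum += 100*i + j
--     return _sum
-- ===== SOURCE B (Python) =====
-- # B: grid-dict simulation that scans the contiguous box run and shifts it cell by cell
-- # (back-to-front), instead of A's flag-based while loop that teleports the first box;
-- # GPS total taken as one comprehension over the final cells.
-- DIRS = {">": (0, 1), "<": (0, -1), "^": (-1, 0), "v": (1, 0)}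
--
--
-- def solution_day15(data) -> int:
--     grid_part, step_part = data.split("\n\n")
--     rows = grid_part.split("\n")
--     cols = len(rows[0])
--     cells = {}
--     bot = None
--     for i, row in enumerate(rows):
--         for j, ch in enumerate(row[:cols]):
--             if ch in ('#', 'O'):
--                 cells[(i, j)] = ch
--             elif ch == '@':
--                 bot = (i, j)
--     for step in step_part.replace("\n", ""):
--         di, dj = DIRS[step]
--         nxt = (bot[0] + di, bot[1] + dj)
--         p = nxt
--         while cells.get(p) == 'O':
--             p = (p[0] + di, p[1] + dj)
--         if p not in cells:
--             while p != nxt: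
--                 q = (p[0] - di, p[1] - dj)
--                 del cells[q]
--                 cells[p] = 'O'
--                 p = q
--             bot = nxt
--     return sum(100 * i + j for (i, j), c in cells.items() if c == 'O')
-- ===== Notes on version B (the rewrite author's own statement) =====
-- stated objective: alternative
-- what changed: B scans the contiguous box run and shifts it one cell forward box-by-box from the far end (and sums GPS with one comprehension over the final cells), instead of A's flag-based while loop that pops the first box and teleports it past the run.
import Mathlib
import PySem

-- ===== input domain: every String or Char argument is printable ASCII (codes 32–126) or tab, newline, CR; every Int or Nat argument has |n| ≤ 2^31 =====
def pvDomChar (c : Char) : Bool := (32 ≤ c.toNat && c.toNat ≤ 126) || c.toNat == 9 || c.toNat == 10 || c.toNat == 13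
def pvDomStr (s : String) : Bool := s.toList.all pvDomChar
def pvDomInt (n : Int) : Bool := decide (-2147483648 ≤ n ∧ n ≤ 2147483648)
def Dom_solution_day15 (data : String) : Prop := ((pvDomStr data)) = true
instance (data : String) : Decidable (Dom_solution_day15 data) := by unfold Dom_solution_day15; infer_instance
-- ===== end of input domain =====

-- B scans the contiguous box run and shifts it forward box-by-box from the far end
-- (GPS total as one filter/map/sum over the final cells), instead of A's flag-based
-- while loop that pops the first box and teleports it past the run. Same return value.

-- ===== PORT A =====
def dirsA : PySem.Dict Char (Int × Int) :=
  PySem.Dict.ofList [('>', ((0 : Int), (1 : Int))), ('<', (0, -1)), ('^', (-1, 0)), ('v', (1, 0))]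

-- parse_input (with split_input inlined): objects dict, bot position, step chars
def parseA (data : String) :
    PySem.Dict (Int × Int) Char × Option (Int × Int) × List Char :=
  let parts := PySem.Chars.splitOn data.toList ['\n', '\n']
  let grid := PySem.Chars.splitOn (parts.getD 0 []) ['\n']
  let steps := PySem.Chars.replace (parts.getD 1 []) ['\n'] []
  let rows : Int := PySem.List.len grid
  let cols : Int := PySem.List.len (PySem.List.pyGetD grid 0 [])
  let st := (PySem.List.pyRange 0 rows).foldl (fun st i =>
      (PySem.List.pyRange 0 cols).foldl (fun st j =>
        let ch := PySem.List.pyGetD (PySem.List.pyGetD grid i []) j ' '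
        let st1 := if ['O', '#'].contains ch then (st.1.insert (i, j) ch, st.2) else st
        if ch == '@' then (st1.1, some (i, j)) else st1) st)
    ((PySem.Dict.empty : PySem.Dict (Int × Int) Char), (none : Option (Int × Int)))
  (st.1, st.2, steps)

-- the inner 'while objnewpos in objects and no_walls' loop (fuel only for totality)
def whileA (objects : PySem.Dict (Int × Int) Char) (move : Int × Int) :
    Nat → (Int × Int) → Bool → (Int × Int) × Bool
  | 0, pos, nw => (pos, nw)
  | fuel + 1, pos, nw =>
    if objects.contains pos && nw then
      let nw' := if objects.getD pos ' ' == '#' then false else nw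
      whileA objects move fuel (pos.1 + move.1, pos.2 + move.2) nw'
    else (pos, nw)

-- one iteration of A's 'for step in steps' loop
def stepA (st : PySem.Dict (Int × Int) Char × (Int × Int)) (step : Char) :
    PySem.Dict (Int × Int) Char × (Int × Int) :=
  let move := dirsA.getD step (0, 0)
  let newpos := (st.2.1 + move.1, st.2.2 + move.2)
  if st.1.contains newpos then
    let r := whileA st.1 move (st.1.size + 1) newpos true
    if r.2 then ((st.1.erase newpos).insert r.1 'O', newpos)
    else st
  else (st.1, newpos)

-- count_gps
def gpsA (objects : PySem.Dict (Int × Int) Char) (shape : Char) : Int :=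
  objects.keys.foldl
    (fun acc k => if objects.getD k ' ' == shape then acc + (100 * k.1 + k.2) else acc) 0

def solution_day15 (data : String) : Int :=
  let p := parseA data
  let st := p.2.2.foldl stepA (p.1, p.2.1.getD (0, 0))
  gpsA st.1 'O'

-- ===== PORT B =====
def dirsB : PySem.Dict Char (Int × Int) :=
  PySem.Dict.ofList [('>', ((0 : Int), (1 : Int))), ('<', (0, -1)), ('^', (-1, 0)), ('v', (1, 0))]

-- parse: cells dict and bot via enumerate over the rows / the row sliced to cols
def parseB (data : String) :
    PySem.Dict (Int × Int) Char × Option (Int × Int) × List Char :=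
  let parts := PySem.Chars.splitOn data.toList ['\n', '\n']
  let rows := PySem.Chars.splitOn (parts.getD 0 []) ['\n']
  let cols : Int := PySem.List.len (PySem.List.pyGetD rows 0 [])
  let st := (PySem.List.enumerate rows 0).foldl (fun st ir =>
      (PySem.List.enumerate (PySem.List.slice ir.2 none (some cols)) 0).foldl (fun st jc =>
        if jc.2 == '#' || jc.2 == 'O' then (st.1.insert (ir.1, jc.1) jc.2, st.2)
        else if jc.2 == '@' then (st.1, some (ir.1, jc.1)) else st) st)
    ((PySem.Dict.empty : PySem.Dict (Int × Int) Char), (none : Option (Int × Int)))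
  (st.1, st.2, PySem.Chars.replace (parts.getD 1 []) ['\n'] [])

-- "while cells.get(p) == 'O': p += d" (fuel only for totality)
def scanB (cells : PySem.Dict (Int × Int) Char) (move : Int × Int) :
    Nat → (Int × Int) → (Int × Int)
  | 0, p => p
  | fuel + 1, p =>
    if cells.get? p == some 'O' then scanB cells move fuel (p.1 + move.1, p.2 + move.2) else p

-- "while p != nxt: q = p - d; del cells[q]; cells[p] = 'O'; p = q"
def shiftB (move : Int × Int) :
    Nat → PySem.Dict (Int × Int) Char → (Int × Int) → (Int × Int) → PySem.Dict (Int × Int) Char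
  | 0, cells, _, _ => cells
  | fuel + 1, cells, p, nxt =>
    if p == nxt then cells
    else
      let q := (p.1 - move.1, p.2 - move.2)
      shiftB move fuel ((cells.erase q).insert p 'O') q nxt

-- one iteration of B's step loop
def stepB (st : PySem.Dict (Int × Int) Char × (Int × Int)) (step : Char) :
    PySem.Dict (Int × Int) Char × (Int × Int) :=
  let move := dirsB.getD step (0, 0)
  let nxt := (st.2.1 + move.1, st.2.2 + move.2)
  let p := scanB st.1 move (st.1.size + 1) nxt
  if st.1.contains p then st
  else (shiftB move (st.1.size + 1) st.1 p nxt, nxt)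

def gpsB (cells : PySem.Dict (Int × Int) Char) : Int :=
  ((cells.items.filter (fun p => p.2 == 'O')).map (fun p => 100 * p.1.1 + p.1.2)).sum

def solution_day15_alt (data : String) : Int :=
  let p := parseB data
  let st := p.2.2.foldl stepB (p.1, p.2.1.getD (0, 0))
  gpsB st.1

-- ===== PRECONDITION & SPEC =====
-- Pre_ is exactly the inputs on which the Python A returns: exactly one "\n\n" separator,
-- no grid row shorter than the first row, only '><^v' step characters, and a robot '@'
-- present (within the first row's width) whenever there is at least one step — otherwise
-- Python A raises ValueError / IndexError / KeyError / TypeError respectively.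
def Pre_solution_day15 (data : String) : Prop :=
  (PySem.Chars.splitOn data.toList ['\n', '\n']).length = 2 ∧
  (∀ r ∈ PySem.Chars.splitOn ((PySem.Chars.splitOn data.toList ['\n', '\n']).getD 0 []) ['\n'],
      ((PySem.Chars.splitOn ((PySem.Chars.splitOn data.toList ['\n', '\n']).getD 0 []) ['\n']).getD 0 []).length
        ≤ r.length) ∧
  ((((PySem.Chars.splitOn data.toList ['\n', '\n']).getD 1 []).filter (fun x => x != '\n')).all
      (fun ch => ch == '>' || ch == '<' || ch == '^' || ch == 'v')) = true ∧
  (((PySem.Chars.splitOn data.toList ['\n', '\n']).getD 1 []).filter (fun x => x != '\n') ≠ [] →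
      ∃ r ∈ PySem.Chars.splitOn ((PySem.Chars.splitOn data.toList ['\n', '\n']).getD 0 []) ['\n'],
        '@' ∈ r.take ((PySem.Chars.splitOn ((PySem.Chars.splitOn data.toList ['\n', '\n']).getD 0 []) ['\n']).getD 0 []).length)

instance (data : String) : Decidable (Pre_solution_day15 data) := by
  unfold Pre_solution_day15; infer_instance

def pvWitness_solution_day15 : String := "#@O.#\n\n>"

def Spec_solution_day15 (data : String) (out : Int) : Prop := out = solution_day15_alt data
instance (data : String) (out : Int) : Decidable (Spec_solution_day15 data out) := by
  unfold Spec_solution_day15; infer_instance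

-- ===== CLAIM (what is proved, stated in full; the proofs are below) =====
def Claim_equal_solution_day15 : Prop :=
  ∀ (data : String), Dom_solution_day15 data → Pre_solution_day15 data →
    Spec_solution_day15 data (solution_day15 data)

-- ===== LEMMAS AND PROOFS =====

lemma go_spec (c : Char) : ∀ fuel (l acc : List Char), l.length ≤ fuel →
    PySem.Chars.replace.go [c] [] fuel l acc = acc.reverse ++ l.filter (fun x => x != c) := by
  intro fuel
  induction fuel with
  | zero =>
    intro l acc h
    have : l = [] := List.length_eq_zero_iff.1 (by omega)
    subst this
    simp [PySem.Chars.replace.go]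
  | succ fuel ih =>
    intro l acc h
    cases l with
    | nil => simp [PySem.Chars.replace.go]
    | cons c' t =>
      rw [PySem.Chars.replace.go]
      by_cases hc : c = c'
      · subst hc
        have hpre : List.isPrefixOf [c] (c :: t) = true := by simp [List.isPrefixOf]
        rw [if_pos hpre]
        simp only [List.length_cons] at h
        have hdrop : List.drop [c].length (c :: t) = t := by simp
        have hacc : ([] : List Char).reverse ++ acc = acc := by simp
        rw [hdrop, hacc, ih t acc (by omega)]
        simp [List.filter_cons]
      · have hpre : List.isPrefixOf [c] (c' :: t) = false := by
          simp [List.isPrefixOf]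
          exact fun hh => absurd hh hc
        rw [if_neg (by simp [hpre])]
        simp only [List.length_cons] at h
        rw [ih t (c' :: acc) (by omega)]
        have : (c' != c) = true := by simpa using fun hh => hc (hh.symm)
        simp [List.filter_cons, this]

lemma replace_filter (l : List Char) :
    PySem.Chars.replace l ['\n'] [] = l.filter (fun x => x != '\n') := by
  rw [PySem.Chars.replace]
  rw [if_neg (by simp)]
  simpa using go_spec '\n' l.length l [] le_rfl

-- direction vectors A uses
def IsDir (m : Int × Int) : Prop := m = (0, 1) ∨ m = (0, -1) ∨ m = (-1, 0) ∨ m = (1, 0)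

-- the n-th cell of the ray from pos in direction m
def ray (pos m : Int × Int) (n : Nat) : Int × Int := (pos.1 + n * m.1, pos.2 + n * m.2)

-- all stored values are walls or boxes
def VOK (d : PySem.Dict (Int × Int) Char) : Prop := ∀ p ∈ d.items, p.2 = '#' ∨ p.2 = 'O'

lemma ray_zero (pos m : Int × Int) : ray pos m 0 = pos := by
  simp [ray]

lemma ray_succ (pos m : Int × Int) (n : Nat) :
    ray pos m (n + 1) = ray (pos.1 + m.1, pos.2 + m.2) m n := by
  simp [ray]; constructor <;> push_cast <;> ring

lemma ray_inj (pos m : Int × Int) (hm : IsDir m) {i j : Nat} (h : ray pos m i = ray pos m j) :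
    i = j := by
  rcases hm with h1 | h1 | h1 | h1 <;> subst h1 <;>
    simp [ray, Prod.ext_iff] at h <;> omega


lemma find?_filter_ne (l : List ((Int × Int) × Char)) (k k' : Int × Int) :
    (l.filter (fun p => !(p.1 == k))).find? (fun p => p.1 == k') =
      if k' = k then none else l.find? (fun p => p.1 == k') := by
  induction l with
  | nil => simp
  | cons x t ih =>
    by_cases hxk : x.1 = k
    · have e1 : (x.1 == k) = true := by simpa using hxk
      by_cases hk : k' = k
      · subst hk
        simp [e1, List.find?_cons, ih, hxk]
      · have e2 : (x.1 == k') = false := by rw [hxk]; simpa using Ne.symm hk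
        simp [e1, e2, List.find?_cons, ih, hk]
    · have e1 : (x.1 == k) = false := by simpa using hxk
      by_cases hxk' : x.1 = k'
      · have hk : ¬ (k' = k) := by rw [← hxk']; exact fun h => hxk h
        have e2 : (x.1 == k') = true := by simpa using hxk'
        simp [e1, e2, List.find?_cons, hk]
      · have e2 : (x.1 == k') = false := by simpa using hxk'
        simp [e1, e2, List.find?_cons, ih]

lemma get?_erase (d : PySem.Dict (Int × Int) Char) (k k' : Int × Int) :
    (d.erase k).get? k' = if k' = k then none else d.get? k' := by
  show ((d.items.filter _).find? _).map _ = _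
  rw [find?_filter_ne]
  split_ifs <;> rfl

lemma keys_erase_sublist (d : PySem.Dict (Int × Int) Char) (k : Int × Int) :
    (d.erase k).keys.Sublist d.keys :=
  List.Sublist.map _ List.filter_sublist

lemma nodup_keys_erase (d : PySem.Dict (Int × Int) Char) (k : Int × Int)
    (h : d.keys.Nodup) : (d.erase k).keys.Nodup :=
  (keys_erase_sublist d k).nodup h

lemma perm_cons_filter (l : List ((Int × Int) × Char)) (hnd : (l.map Prod.fst).Nodup)
    (k : Int × Int) (v : Char) (h : (k, v) ∈ l) :
    l.Perm ((k, v) :: l.filter (fun p => !(p.1 == k))) := by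
  induction l with
  | nil => simp at h
  | cons x t ih =>
    simp only [List.map_cons, List.nodup_cons] at hnd
    rcases List.mem_cons.1 h with rfl | hmem
    · have hft : t.filter (fun p => !(p.1 == k)) = t := by
        apply List.filter_eq_self.2
        intro p hp
        simp only [Bool.not_eq_eq_eq_not, Bool.not_true, beq_eq_false_iff_ne, ne_eq]
        intro hpk
        have hm : p.1 ∈ List.map Prod.fst t := List.mem_map_of_mem hp
        rw [hpk] at hm
        exact hnd.1 hm
      simp [hft]
    · have hxk : x.1 ≠ k := by
        intro hxk
        have hm : (k, v).1 ∈ List.map Prod.fst t := List.mem_map_of_mem hmem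
        rw [← hxk] at hm
        exact hnd.1 hm
      have e1 : (x.1 == k) = false := by simpa using hxk
      have e2 : (x :: t).filter (fun p => !(p.1 == k)) = x :: t.filter (fun p => !(p.1 == k)) := by
        simp [List.filter_cons, e1]
      rw [e2]
      exact ((ih hnd.2 hmem).cons x).trans (List.Perm.swap (k, v) x _)

lemma get?_eq_of_perm (c d : PySem.Dict (Int × Int) Char)
    (hp : c.items.Perm d.items) (hnd : d.keys.Nodup) (k : Int × Int) :
    c.get? k = d.get? k := by
  have hndc : c.keys.Nodup := ((hp.map Prod.fst).nodup_iff).2 hnd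
  cases hd : d.get? k with
  | none =>
    have hk : k ∉ d.keys := (PySem.Dict.get?_eq_none_iff_not_mem_keys d k).1 hd
    have : k ∉ c.keys := fun hc => hk ((hp.map Prod.fst).mem_iff.1 hc)
    exact (PySem.Dict.get?_eq_none_iff_not_mem_keys c k).2 this
  | some v =>
    have := (PySem.Dict.get?_eq_some_iff_mem_items d k v hnd).1 hd
    exact (PySem.Dict.get?_eq_some_iff_mem_items c k v hndc).2 (hp.mem_iff.2 this)

-- membership ray from pos in direction m (collinear and forward)
def inRay (m pos k : Int × Int) : Bool :=
  decide ((k.1 - pos.1) * m.2 = (k.2 - pos.2) * m.1 ∧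
    0 ≤ (k.1 - pos.1) * m.1 + (k.2 - pos.2) * m.2)

lemma inRay_self (m pos : Int × Int) : inRay m pos pos = true := by simp [inRay]

lemma inRay_step (m : Int × Int) (hm : IsDir m) (pos k : Int × Int) :
    inRay m pos k = true ↔ inRay m (pos.1 + m.1, pos.2 + m.2) k = true ∨ k = pos := by
  rcases hm with h | h | h | h <;> subst h <;> simp [inRay, Prod.ext_iff] <;> omega

lemma inRay_next_self (m : Int × Int) (hm : IsDir m) (pos : Int × Int) :
    inRay m (pos.1 + m.1, pos.2 + m.2) pos = false := by
  rcases hm with h | h | h | h <;> subst h <;> simp [inRay] <;> omega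

def countM (d : PySem.Dict (Int × Int) Char) (m pos : Int × Int) : Nat :=
  (d.items.filter (fun p => inRay m pos p.1)).length

lemma length_filter_or (l : List ((Int × Int) × Char)) (f g : (Int × Int) × Char → Bool)
    (hdis : ∀ x ∈ l, ¬(f x = true ∧ g x = true)) :
    (l.filter (fun x => f x || g x)).length = (l.filter f).length + (l.filter g).length := by
  induction l with
  | nil => simp
  | cons x t ih =>
    have ht := ih (fun y hy => hdis y (List.mem_cons_of_mem x hy))
    have hx := hdis x (List.mem_cons_self ..)
    by_cases hf : f x = true
    · have hg : g x = false := by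
        cases hgx : g x
        · rfl
        · exact absurd ⟨hf, hgx⟩ hx
      simp [List.filter_cons, hf, hg, ht]
      omega
    · have hf' : f x = false := by simpa using hf
      cases hg : g x <;> simp [List.filter_cons, hf', hg, ht] <;> omega

lemma countM_lt (d : PySem.Dict (Int × Int) Char) (m : Int × Int) (hm : IsDir m)
    {pos : Int × Int} (hmem : pos ∈ d.keys) :
    countM d m (pos.1 + m.1, pos.2 + m.2) < countM d m pos := by
  obtain ⟨p, hp, hp1⟩ := List.mem_map.1 hmem
  have hcong : ∀ x ∈ d.items,
      inRay m pos x.1 = (inRay m (pos.1 + m.1, pos.2 + m.2) x.1 || x.1 == pos) := by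
    intro x _
    have hstep := inRay_step m hm pos x.1
    have hns := inRay_next_self m hm pos
    by_cases hxp : x.1 = pos
    · simp [hxp, inRay_self, hns]
    · cases hL : inRay m pos x.1 <;> cases hR : inRay m (pos.1 + m.1, pos.2 + m.2) x.1 <;>
        simp_all
  unfold countM
  rw [List.filter_congr hcong]
  rw [length_filter_or _ _ _ (by
    intro x _ hand
    have h1 := (inRay_step m hm pos x.1).2 (Or.inl hand.1)
    have hx : x.1 = pos := by simpa using hand.2
    rw [hx] at hand
    exact absurd hand.1 (by simp [inRay_next_self m hm pos]))]
  have hmemf : p ∈ d.items.filter (fun x => x.1 == pos) := by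
    rw [List.mem_filter]
    exact ⟨hp, by simpa using hp1⟩
  have := List.length_pos_of_mem hmemf
  omega

lemma exists_run (d : PySem.Dict (Int × Int) Char) (m : Int × Int) (hm : IsDir m)
    (pos : Int × Int) :
    ∃ n, n ≤ d.size ∧ (∀ i, i < n → d.get? (ray pos m i) = some 'O') ∧
      d.get? (ray pos m n) ≠ some 'O' := by
  have key : ∀ N pos, countM d m pos ≤ N →
      ∃ n, n ≤ countM d m pos ∧ (∀ i, i < n → d.get? (ray pos m i) = some 'O') ∧
        d.get? (ray pos m n) ≠ some 'O' := by
    intro N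
    induction N with
    | zero =>
      intro pos h0
      by_cases hO : d.get? pos = some 'O'
      · exfalso
        have hmem : pos ∈ d.keys := by
          by_contra hmem
          rw [(PySem.Dict.get?_eq_none_iff_not_mem_keys d pos).2 hmem] at hO
          simp at hO
        obtain ⟨p, hp, hp1⟩ := List.mem_map.1 hmem
        have hmemf : p ∈ d.items.filter (fun x => inRay m pos x.1) := by
          rw [List.mem_filter]
          exact ⟨hp, by rw [hp1]; exact inRay_self m pos⟩
        have := List.length_pos_of_mem hmemf
        unfold countM at h0
        omega
      · exact ⟨0, Nat.zero_le _, fun i hi => absurd hi (by omega),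
          by simpa [ray_zero] using hO⟩
    | succ N ih =>
      intro pos hN
      by_cases hO : d.get? pos = some 'O'
      · have hmem : pos ∈ d.keys := by
          by_contra hmem
          rw [(PySem.Dict.get?_eq_none_iff_not_mem_keys d pos).2 hmem] at hO
          simp at hO
        have hlt := countM_lt d m hm hmem
        obtain ⟨n, hn1, hn2, hn3⟩ := ih (pos.1 + m.1, pos.2 + m.2) (by omega)
        refine ⟨n + 1, by omega, ?_, ?_⟩
        · intro i hi
          cases i with
          | zero => simpa [ray_zero] using hO
          | succ i => rw [ray_succ]; exact hn2 i (by omega)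
        · rw [ray_succ]; exact hn3
      · exact ⟨0, Nat.zero_le _, fun i hi => absurd hi (by omega),
          by simpa [ray_zero] using hO⟩
  obtain ⟨n, h1, h2⟩ := key (countM d m pos) pos le_rfl
  have hle : countM d m pos ≤ d.size := List.length_filter_le _ _
  exact ⟨n, le_trans h1 hle, h2⟩

lemma whileA_false (d : PySem.Dict (Int × Int) Char) (m : Int × Int) :
    ∀ fuel pos, whileA d m fuel pos false = (pos, false) := by
  intro fuel pos
  cases fuel <;> simp [whileA]

lemma whileA_run (d : PySem.Dict (Int × Int) Char) (m : Int × Int) (hv : VOK d) :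
    ∀ n pos fuel, n + 1 ≤ fuel →
    (∀ i, i < n → d.get? (ray pos m i) = some 'O') →
    d.get? (ray pos m n) ≠ some 'O' →
    whileA d m fuel pos true =
      if d.get? (ray pos m n) = none then (ray pos m n, true)
      else (((ray pos m n).1 + m.1, (ray pos m n).2 + m.2), false) := by
  intro n
  induction n with
  | zero =>
    intro pos fuel hf h1 h2
    obtain ⟨fuel, rfl⟩ : ∃ f, fuel = f + 1 := ⟨fuel - 1, by omega⟩
    rw [ray_zero] at h2 ⊢
    cases hg : d.get? pos with
    | none =>
      have hc : d.contains pos = false := by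
        rw [PySem.Dict.contains_eq_isSome_get?, hg]; rfl
      simp [whileA, hc, hg]
    | some w =>
      have hc : d.contains pos = true := by
        rw [PySem.Dict.contains_eq_isSome_get?, hg]; rfl
      have hw : w = '#' := by
        have hmem := PySem.Dict.mem_items_of_get?_eq_some _ hg
        rcases hv _ hmem with h | h
        · exact h
        · exact absurd (by rw [hg]; exact congrArg some h) h2
      have hgetD : d.getD pos ' ' = '#' := by
        rw [PySem.Dict.getD_eq_get?_getD, hg, hw]; rfl
      simp [whileA, hc, hgetD, whileA_false, hg]
  | succ n ih =>
    intro pos fuel hf h1 h2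
    obtain ⟨fuel, rfl⟩ : ∃ f, fuel = f + 1 := ⟨fuel - 1, by omega⟩
    have h0 : d.get? pos = some 'O' := by simpa [ray_zero] using h1 0 (Nat.succ_pos n)
    have hc : d.contains pos = true := by
      rw [PySem.Dict.contains_eq_isSome_get?, h0]; rfl
    have hgetD : d.getD pos ' ' = 'O' := by
      rw [PySem.Dict.getD_eq_get?_getD, h0]; rfl
    have hstep : whileA d m (fuel + 1) pos true =
        whileA d m fuel (pos.1 + m.1, pos.2 + m.2) true := by
      simp [whileA, hc, hgetD]
    rw [hstep, ih (pos.1 + m.1, pos.2 + m.2) fuel (by omega)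
        (fun i hi => by rw [← ray_succ]; exact h1 (i + 1) (by omega))
        (by rw [← ray_succ]; exact h2), ← ray_succ]

lemma scanB_run (c : PySem.Dict (Int × Int) Char) (m : Int × Int) :
    ∀ n pos fuel, n + 1 ≤ fuel →
    (∀ i, i < n → c.get? (ray pos m i) = some 'O') →
    c.get? (ray pos m n) ≠ some 'O' →
    scanB c m fuel pos = ray pos m n := by
  intro n
  induction n with
  | zero =>
    intro pos fuel hf h1 h2
    obtain ⟨fuel, rfl⟩ : ∃ f, fuel = f + 1 := ⟨fuel - 1, by omega⟩
    rw [ray_zero] at h2 ⊢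
    have : (c.get? pos == some 'O') = false := by simpa using h2
    simp [scanB, this]
  | succ n ih =>
    intro pos fuel hf h1 h2
    obtain ⟨fuel, rfl⟩ : ∃ f, fuel = f + 1 := ⟨fuel - 1, by omega⟩
    have h0 : c.get? pos = some 'O' := by simpa [ray_zero] using h1 0 (Nat.succ_pos n)
    have : (c.get? pos == some 'O') = true := by simp [h0]
    rw [ray_succ]
    simp only [scanB, this, if_pos rfl]
    exact ih (pos.1 + m.1, pos.2 + m.2) fuel (by omega)
      (fun i hi => by rw [← ray_succ]; exact h1 (i + 1) (by omega))
      (by rw [← ray_succ]; exact h2)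

lemma shiftB_stop (m : Int × Int) : ∀ fuel c p, shiftB m fuel c p p = c := by
  intro fuel c p
  cases fuel <;> simp [shiftB]

lemma ray_sub (pos m : Int × Int) (n : Nat) :
    ((ray pos m (n + 1)).1 - m.1, (ray pos m (n + 1)).2 - m.2) = ray pos m n := by
  simp [ray, Prod.ext_iff]
  constructor <;> push_cast <;> ring


lemma items_erase (d : PySem.Dict (Int × Int) Char) (k : Int × Int) :
    (d.erase k).items = d.items.filter (fun p => !(p.1 == k)) := rfl

lemma contains_false_of_get?_none {d : PySem.Dict (Int × Int) Char} {k : Int × Int}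
    (h : d.get? k = none) : d.contains k = false := by
  rw [PySem.Dict.contains_eq_isSome_get?, h]; rfl

lemma ray_ne (pos m : Int × Int) (hm : IsDir m) {i j : Nat} (h : i ≠ j) :
    ray pos m i ≠ ray pos m j := fun he => h (ray_inj pos m hm he)

lemma filter_swap (l : List ((Int × Int) × Char)) (f g : (Int × Int) × Char → Bool) :
    (l.filter g).filter f = (l.filter f).filter g := by
  rw [List.filter_filter, List.filter_filter]
  exact List.filter_congr fun x _ => Bool.and_comm _ _

lemma shiftB_run (m : Int × Int) (hm : IsDir m) :
    ∀ n fuel (c : PySem.Dict (Int × Int) Char) (nxt : Int × Int),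
    1 ≤ n → n ≤ fuel → c.keys.Nodup →
    (∀ i, i < n → c.get? (ray nxt m i) = some 'O') →
    c.get? (ray nxt m n) = none →
    (shiftB m fuel c (ray nxt m n) nxt).items.Perm
      (((c.erase nxt).insert (ray nxt m n) 'O').items) := by
  intro n
  induction n with
  | zero => intro fuel c nxt h1; omega
  | succ n ih =>
    intro fuel c nxt _ hfuel hnd hrun hnone
    obtain ⟨fuel, rfl⟩ : ∃ f, fuel = f + 1 := ⟨fuel - 1, by omega⟩
    have hne : (ray nxt m (n + 1) == nxt) = false := by
      have h := ray_ne nxt m hm (i := n + 1) (j := 0) (by omega)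
      rw [ray_zero] at h
      simpa using h
    rw [shiftB]
    simp only [hne, Bool.false_eq_true, if_false, ray_sub]
    rcases Nat.eq_zero_or_pos n with rfl | hn1
    · rw [ray_zero, shiftB_stop]
    · -- n ≥ 1
      have hnen1 : ray nxt m n ≠ ray nxt m (n + 1) := ray_ne nxt m hm (by omega)
      have hg2 : ∀ x, ((c.erase (ray nxt m n)).insert (ray nxt m (n + 1)) 'O').get? x =
          if x = ray nxt m (n + 1) then some 'O'
          else if x = ray nxt m n then none else c.get? x := by
        intro x
        rw [PySem.Dict.get?_insert, get?_erase]
      have hnd2 : ((c.erase (ray nxt m n)).insert (ray nxt m (n + 1)) 'O').keys.Nodup :=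
        PySem.Dict.nodup_keys_insert _ _ _ (nodup_keys_erase _ _ hnd)
      have hih := ih fuel ((c.erase (ray nxt m n)).insert (ray nxt m (n + 1)) 'O') nxt hn1
        (by omega) hnd2
        (by
          intro i hi
          rw [hg2]
          rw [if_neg (ray_ne nxt m hm (by omega)), if_neg (ray_ne nxt m hm (by omega))]
          exact hrun i (by omega))
        (by rw [hg2, if_neg hnen1, if_pos rfl])
      refine hih.trans ?_
      -- now pure item computations
      have hcne : ∀ j : Nat, j ≠ 0 → (ray nxt m j == nxt) = false := by
        intro j hj
        have h := ray_ne nxt m hm (i := j) (j := 0) hj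
        rw [ray_zero] at h
        simpa using h
      have hmemn : (ray nxt m n, 'O') ∈ c.items :=
        PySem.Dict.mem_items_of_get?_eq_some _ (hrun n (by omega))
      -- insert freshness facts
      have hf1 : (((c.erase (ray nxt m n)).insert (ray nxt m (n + 1)) 'O').erase nxt).contains
          (ray nxt m n) = false := by
        apply contains_false_of_get?_none
        rw [get?_erase, if_neg (by
          have h := ray_ne nxt m hm (i := n) (j := 0) (by omega)
          rwa [ray_zero] at h), hg2, if_neg hnen1, if_pos rfl]
      have hf2 : (c.erase (ray nxt m n)).contains (ray nxt m (n + 1)) = false := by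
        apply contains_false_of_get?_none
        rw [get?_erase, if_neg (Ne.symm hnen1)]
        exact hnone
      have hf3 : (c.erase nxt).contains (ray nxt m (n + 1)) = false := by
        apply contains_false_of_get?_none
        rw [get?_erase]
        split_ifs with h
        · rfl
        · exact hnone
      rw [PySem.Dict.items_insert_of_not_contains _ _ hf1,
          PySem.Dict.items_insert_of_not_contains _ _ hf3,
          items_erase, PySem.Dict.items_insert_of_not_contains _ _ hf2,
          items_erase, List.filter_append, items_erase]
      have hsing : List.filter (fun p => !(p.1 == nxt)) [(ray nxt m (n + 1), 'O')] =
          [(ray nxt m (n + 1), 'O')] := by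
        simp [List.filter_cons, hcne (n + 1) (by omega)]
      rw [hsing]
      have hmemf : (ray nxt m n, 'O') ∈ (c.erase nxt).items := by
        rw [items_erase, List.mem_filter]
        exact ⟨hmemn, by simp [hcne n (by omega)]⟩
      have hpcf := perm_cons_filter (c.erase nxt).items (nodup_keys_erase _ _ hnd)
        (ray nxt m n) 'O' hmemf
      rw [items_erase] at hpcf
      refine (List.perm_append_singleton _ _).trans ?_
      rw [filter_swap]
      exact List.Perm.append_right _ hpcf.symm

lemma dirs_eq : dirsB = dirsA := rfl

lemma step_rel (d c : PySem.Dict (Int × Int) Char) (bp : Int × Int) (ch : Char)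
    (hch : ch = '>' ∨ ch = '<' ∨ ch = '^' ∨ ch = 'v')
    (hnd : d.keys.Nodup) (hv : VOK d) (hp : c.items.Perm d.items) :
    (stepB (c, bp) ch).1.items.Perm (stepA (d, bp) ch).1.items ∧
    (stepB (c, bp) ch).2 = (stepA (d, bp) ch).2 ∧
    (stepA (d, bp) ch).1.keys.Nodup ∧ VOK (stepA (d, bp) ch).1 := by
  have hndc : c.keys.Nodup := ((hp.map Prod.fst).nodup_iff).2 hnd
  have hget := get?_eq_of_perm c d hp hnd
  have hsize : c.size = d.size := hp.length_eq
  have hm : IsDir (dirsA.getD ch (0, 0)) := by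
    rcases hch with rfl | rfl | rfl | rfl <;> (unfold IsDir; decide)
  obtain ⟨n, hnsz, hrun, hstop⟩ := exists_run d (dirsA.getD ch (0, 0)) hm
    (bp.1 + (dirsA.getD ch (0, 0)).1, bp.2 + (dirsA.getD ch (0, 0)).2)
  set m := dirsA.getD ch (0, 0) with hmdef
  set nxt := (bp.1 + m.1, bp.2 + m.2) with hnxtdef
  have hrun_c : ∀ i, i < n → c.get? (ray nxt m i) = some 'O' := fun i hi => by
    rw [hget]; exact hrun i hi
  have hstop_c : c.get? (ray nxt m n) ≠ some 'O' := by rw [hget]; exact hstop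
  have hscan : scanB c m (c.size + 1) nxt = ray nxt m n :=
    scanB_run c m n nxt (c.size + 1) (by omega) hrun_c hstop_c
  cases hfree : d.get? (ray nxt m n) with
  | none =>
    have hfree_c : c.get? (ray nxt m n) = none := by rw [hget, hfree]
    have hcB : c.contains (ray nxt m n) = false := contains_false_of_get?_none hfree_c
    have hB : stepB (c, bp) ch = (shiftB m (c.size + 1) c (ray nxt m n) nxt, nxt) := by
      simp only [stepB, dirs_eq, ← hmdef, ← hnxtdef, hscan, hcB, Bool.false_eq_true, if_false]
    rcases Nat.eq_zero_or_pos n with rfl | hn1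
    · -- free cell right next to the bot: neither side changes the dict
      rw [ray_zero] at hfree hfree_c
      have hcA : d.contains nxt = false := contains_false_of_get?_none hfree
      have hA : stepA (d, bp) ch = (d, nxt) := by
        simp only [stepA, ← hmdef, ← hnxtdef, hcA, Bool.false_eq_true, if_false]
      rw [hA, hB, ray_zero, shiftB_stop]
      exact ⟨hp, rfl, hnd, hv⟩
    · -- a run of n boxes is pushed
      have h0 : d.get? nxt = some 'O' := by
        have := hrun 0 (by omega)
        rwa [ray_zero] at this
      have hcA : d.contains nxt = true := by
        rw [PySem.Dict.contains_eq_isSome_get?, h0]; rfl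
      have hwhile := whileA_run d m hv n nxt (d.size + 1) (by omega) hrun hstop
      rw [hfree] at hwhile
      have hA : stepA (d, bp) ch = ((d.erase nxt).insert (ray nxt m n) 'O', nxt) := by
        simp only [stepA, ← hmdef, ← hnxtdef, hcA, hwhile]
        simp
      have hnne : ray nxt m n ≠ nxt := by
        have h := ray_ne nxt m hm (i := n) (j := 0) (by omega)
        rwa [ray_zero] at h
      have hfc : (c.erase nxt).contains (ray nxt m n) = false := by
        apply contains_false_of_get?_none
        rw [get?_erase, if_neg hnne, hfree_c]
      have hfd : (d.erase nxt).contains (ray nxt m n) = false := by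
        apply contains_false_of_get?_none
        rw [get?_erase, if_neg hnne, hfree]
      have hperm : (shiftB m (c.size + 1) c (ray nxt m n) nxt).items.Perm
          (((d.erase nxt).insert (ray nxt m n) 'O').items) := by
        refine (shiftB_run m hm n (c.size + 1) c nxt hn1 (by omega) hndc hrun_c hfree_c).trans ?_
        rw [PySem.Dict.items_insert_of_not_contains _ _ hfc,
            PySem.Dict.items_insert_of_not_contains _ _ hfd, items_erase, items_erase]
        exact (hp.filter _).append_right _
      refine ⟨by rw [hA, hB]; exact hperm, by rw [hA, hB], ?_, ?_⟩
      · rw [hA]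
        exact PySem.Dict.nodup_keys_insert _ _ _ (nodup_keys_erase _ _ hnd)
      · rw [hA]
        intro p hpmem
        rw [PySem.Dict.items_insert_of_not_contains _ _ hfd, items_erase] at hpmem
        rcases List.mem_append.1 hpmem with h | h
        · exact hv _ (List.mem_of_mem_filter h)
        · simp only [List.mem_singleton] at h
          subst h
          exact Or.inr rfl
  | some w =>
    have hsome_c : c.get? (ray nxt m n) = some w := by rw [hget, hfree]
    have hcB : c.contains (ray nxt m n) = true := by
      rw [PySem.Dict.contains_eq_isSome_get?, hsome_c]; rfl
    have hB : stepB (c, bp) ch = (c, bp) := by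
      simp only [stepB, dirs_eq, ← hmdef, ← hnxtdef, hscan, hcB]
      simp
    have hcA : d.contains nxt = true := by
      rcases Nat.eq_zero_or_pos n with rfl | hn1
      · rw [ray_zero] at hfree
        rw [PySem.Dict.contains_eq_isSome_get?, hfree]; rfl
      · have h0 : d.get? nxt = some 'O' := by
          have := hrun 0 (by omega)
          rwa [ray_zero] at this
        rw [PySem.Dict.contains_eq_isSome_get?, h0]; rfl
    have hwhile := whileA_run d m hv n nxt (d.size + 1) (by omega) hrun hstop
    rw [hfree] at hwhile
    have hA : stepA (d, bp) ch = (d, bp) := by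
      simp only [stepA, ← hmdef, ← hnxtdef, hcA, hwhile]
      simp
    rw [hA, hB]
    exact ⟨hp, rfl, hnd, hv⟩

lemma fold_rel (steps : List Char) (d c : PySem.Dict (Int × Int) Char) (bp : Int × Int)
    (hch : ∀ ch ∈ steps, ch = '>' ∨ ch = '<' ∨ ch = '^' ∨ ch = 'v')
    (hnd : d.keys.Nodup) (hv : VOK d) (hp : c.items.Perm d.items) :
    (steps.foldl stepB (c, bp)).1.items.Perm (steps.foldl stepA (d, bp)).1.items ∧
    (steps.foldl stepB (c, bp)).2 = (steps.foldl stepA (d, bp)).2 ∧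
    (steps.foldl stepA (d, bp)).1.keys.Nodup ∧ VOK (steps.foldl stepA (d, bp)).1 := by
  induction steps generalizing d c bp with
  | nil => exact ⟨hp, rfl, hnd, hv⟩
  | cons ch t ih =>
    have h1 := step_rel d c bp ch (hch ch (by simp)) hnd hv hp
    have h2 := ih (stepA (d, bp) ch).1 (stepB (c, bp) ch).1 (stepA (d, bp) ch).2
      (fun x hx => hch x (by simp [hx])) h1.2.2.1 h1.2.2.2 h1.1
    have he : ((stepB (c, bp) ch).1, (stepA (d, bp) ch).2) = stepB (c, bp) ch := by
      rw [← h1.2.1]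
    rw [List.foldl_cons, List.foldl_cons, ← he]
    exact h2

lemma body_eq (st : PySem.Dict (Int × Int) Char × Option (Int × Int)) (i j : Int) (ch : Char) :
    (if ch == '#' || ch == 'O' then (st.1.insert (i, j) ch, st.2)
     else if ch == '@' then (st.1, some (i, j)) else st)
    = (let st1 := if ['O', '#'].contains ch then (st.1.insert (i, j) ch, st.2) else st
       if ch == '@' then (st1.1, some (i, j)) else st1) := by
  by_cases hO : ch = 'O'
  · subst hO; simp
  · by_cases hH : ch = '#'
    · subst hH; simp
    · by_cases hA : ch = '@'
      · subst hA; simp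
      · have bO : (ch == 'O') = false := by simpa using hO
        have bH : (ch == '#') = false := by simpa using hH
        have bA : (ch == '@') = false := by simpa using hA
        simp [List.contains_cons, bO, bH, bA]
        intro h
        rcases h with rfl | rfl
        · exact (hO rfl).elim
        · exact (hH rfl).elim

lemma inner_eq (r : List Char) (cols : Int) (hc : 0 ≤ cols) (i : Int)
    (st : PySem.Dict (Int × Int) Char × Option (Int × Int)) :
    (PySem.List.enumerate (PySem.List.slice r none (some cols)) 0).foldl
      (fun st jc => if jc.2 == '#' || jc.2 == 'O' then (st.1.insert (i, jc.1) jc.2, st.2)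
        else if jc.2 == '@' then (st.1, some (i, jc.1)) else st) st
    = (PySem.List.pyRange 0 cols).foldl
      (fun st j =>
        let ch := PySem.List.pyGetD (r) j ' '
        let st1 := if ['O', '#'].contains ch then (st.1.insert (i, j) ch, st.2) else st
        if ch == '@' then (st1.1, some (i, j)) else st1) st := by
  rw [PySem.List.slice_to r hc]
  rw [PySem.List.enumerate_eq_map_pyRange (List.take cols.toNat r) ' ']
  rw [List.foldl_map]
  have hlen : PySem.List.len (List.take cols.toNat r) = ((min cols.toNat r.length : Nat) : Int) := by
    simp [PySem.List.len]
  rw [hlen]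
  have hsplit : PySem.List.pyRange 0 cols =
      PySem.List.pyRange 0 ((min cols.toNat r.length : Nat) : Int) ++
      PySem.List.pyRange ((min cols.toNat r.length : Nat) : Int) cols := by
    apply PySem.List.pyRange_one_append
    · positivity
    · omega
  rw [hsplit, List.foldl_append]
  have htail : ∀ (st0 : PySem.Dict (Int × Int) Char × Option (Int × Int)),
      (PySem.List.pyRange ((min cols.toNat r.length : Nat) : Int) cols).foldl
        (fun st j =>
          let ch := PySem.List.pyGetD (r) j ' '
          let st1 := if ['O', '#'].contains ch then (st.1.insert (i, j) ch, st.2) else st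
          if ch == '@' then (st1.1, some (i, j)) else st1) st0 = st0 := by
    intro st0
    rw [PySem.List.foldl_congr_mem _ _ (fun st _ => st) st0 ?_]
    · exact PySem.List.foldl_ignore _ _
    · intro acc j hj
      have hjb := (PySem.List.mem_pyRange_one).1 hj
      have hch : PySem.List.pyGetD r j ' ' = ' ' := by
        rw [PySem.List.pyGetD_of_nonneg _ _ (by omega)]
        apply List.getD_eq_default
        omega
      simp [hch]
  rw [htail]
  apply PySem.List.foldl_congr_mem
  intro acc j hj
  have hjb := (PySem.List.mem_pyRange_one).1 hj
  have hch : PySem.List.pyGetD (List.take cols.toNat r) j ' ' = PySem.List.pyGetD r j ' ' := by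
    rw [PySem.List.pyGetD_of_nonneg _ _ (by omega), PySem.List.pyGetD_of_nonneg _ _ (by omega)]
    unfold List.getD
    rw [List.getElem?_take]
    rw [if_pos (by omega)]
  simp only [hch]
  exact body_eq acc i j _

lemma parse_eq (data : String) : parseB data = parseA data := by
  simp only [parseA, parseB]
  have hc : 0 ≤ PySem.List.len (PySem.List.pyGetD
      (PySem.Chars.splitOn ((PySem.Chars.splitOn data.toList ['\n', '\n']).getD 0 []) ['\n']) 0 []) := by
    simp [PySem.List.len]
  have hfold :
      (PySem.List.enumerate (PySem.Chars.splitOn ((PySem.Chars.splitOn data.toList ['\n', '\n']).getD 0 []) ['\n']) 0).foldl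
        (fun st ir =>
          (PySem.List.enumerate (PySem.List.slice ir.2 none (some (PySem.List.len (PySem.List.pyGetD
            (PySem.Chars.splitOn ((PySem.Chars.splitOn data.toList ['\n', '\n']).getD 0 []) ['\n']) 0 [])))) 0).foldl
            (fun st jc => if jc.2 == '#' || jc.2 == 'O' then (st.1.insert (ir.1, jc.1) jc.2, st.2)
              else if jc.2 == '@' then (st.1, some (ir.1, jc.1)) else st) st)
        ((PySem.Dict.empty : PySem.Dict (Int × Int) Char), (none : Option (Int × Int)))
      = (PySem.List.pyRange 0 (PySem.List.len
          (PySem.Chars.splitOn ((PySem.Chars.splitOn data.toList ['\n', '\n']).getD 0 []) ['\n']))).foldl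
        (fun st i =>
          (PySem.List.pyRange 0 (PySem.List.len (PySem.List.pyGetD
            (PySem.Chars.splitOn ((PySem.Chars.splitOn data.toList ['\n', '\n']).getD 0 []) ['\n']) 0 []))).foldl
            (fun st j =>
              let ch := PySem.List.pyGetD (PySem.List.pyGetD
                (PySem.Chars.splitOn ((PySem.Chars.splitOn data.toList ['\n', '\n']).getD 0 []) ['\n']) i []) j ' '
              let st1 := if ['O', '#'].contains ch then (st.1.insert (i, j) ch, st.2) else st
              if ch == '@' then (st1.1, some (i, j)) else st1) st)
        ((PySem.Dict.empty : PySem.Dict (Int × Int) Char), (none : Option (Int × Int))) := by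
    rw [PySem.List.enumerate_eq_map_pyRange
      (PySem.Chars.splitOn ((PySem.Chars.splitOn data.toList ['\n', '\n']).getD 0 []) ['\n']) []]
    rw [List.foldl_map]
    apply PySem.List.foldl_congr_mem
    intro acc i _
    exact inner_eq _ _ hc i acc
  rw [hfold]

lemma foldl_preserve {α β : Type} (P : β → Prop) (f : β → α → β) (l : List α) (init : β)
    (h : ∀ st x, P st → P (f st x)) (h0 : P init) : P (l.foldl f init) := by
  induction l generalizing init with
  | nil => exact h0
  | cons x t ih => exact ih _ (h _ _ h0)

lemma parseA_inv (data : String) : (parseA data).1.keys.Nodup ∧ VOK (parseA data).1 := by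
  simp only [parseA]
  apply foldl_preserve (P := fun (st : PySem.Dict (Int × Int) Char × Option (Int × Int)) =>
    st.1.keys.Nodup ∧ VOK st.1)
  · intro st i hst
    apply foldl_preserve (P := fun (st : PySem.Dict (Int × Int) Char × Option (Int × Int)) =>
      st.1.keys.Nodup ∧ VOK st.1)
    · intro st j hst
      set ch := PySem.List.pyGetD (PySem.List.pyGetD
        (PySem.Chars.splitOn ((PySem.Chars.splitOn data.toList ['\n', '\n']).getD 0 []) ['\n'])
        i []) j ' ' with hch
      have hstep : ∀ (st1 : PySem.Dict (Int × Int) Char × Option (Int × Int)),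
          st1.1.keys.Nodup ∧ VOK st1.1 →
          ((if ch == '@' then (st1.1, some (i, j)) else st1)).1.keys.Nodup ∧
            VOK ((if ch == '@' then (st1.1, some (i, j)) else st1)).1 := by
        intro st1 h1
        cases hc : (ch == '@') <;> simp [hc] <;> exact h1
      apply hstep
      by_cases hO : ['O', '#'].contains ch = true
      · rw [if_pos hO]
        have hval : ch = '#' ∨ ch = 'O' := by
          simp [List.contains_cons] at hO
          tauto
        refine ⟨PySem.Dict.nodup_keys_insert _ _ _ hst.1, ?_⟩
        intro p hpmem
        rcases (PySem.Dict.mem_items_insert _ _ _ _).1 hpmem with rfl | hmem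
        · exact hval
        · exact hst.2 _ hmem.1
      · rw [if_neg hO]
        exact hst
    · exact hst
  · constructor
    · simp [PySem.Dict.empty, PySem.Dict.keys]
    · intro p hp
      simp [PySem.Dict.empty] at hp

lemma parseA_nodup (data : String) : (parseA data).1.keys.Nodup := (parseA_inv data).1

lemma parseA_vok (data : String) : VOK (parseA data).1 := (parseA_inv data).2

lemma gps_eq (d c : PySem.Dict (Int × Int) Char) (hnd : d.keys.Nodup)
    (hp : c.items.Perm d.items) : gpsB c = gpsA d 'O' := by
  have h1 : gpsA d 'O' =
      ((d.keys.filter (fun k => d.getD k ' ' == 'O')).map (fun k => 100 * k.1 + k.2)).sum := by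
    unfold gpsA
    rw [PySem.List.foldl_if_eq_foldl_filter (p := fun k : Int × Int => d.getD k ' ' == 'O')
      (f := fun acc (k : Int × Int) => acc + (100 * k.1 + k.2)),
      PySem.List.foldl_add, zero_add]
  have hA : gpsA d 'O' =
      ((d.items.filter (fun p => p.2 == 'O')).map (fun p => 100 * p.1.1 + p.1.2)).sum := by
    rw [h1, PySem.Dict.items_eq_map_keys d hnd ' ', List.filter_map, List.map_map]
    rfl
  unfold gpsB
  rw [hA]
  exact (((hp.filter _).map _).sum_eq)

-- ===== VERDICT (by name: the statement is the Claim_ definition above) =====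
theorem solution_day15_spec : Claim_equal_solution_day15 := by
  intro data hdom hpre
  unfold Spec_solution_day15 solution_day15 solution_day15_alt
  rw [parse_eq data]
  obtain ⟨h2, hrows, hsteps, hbot⟩ := hpre
  have hsA : (parseA data).2.2 =
      ((PySem.Chars.splitOn data.toList ['\n', '\n']).getD 1 []).filter (fun x => x != '\n') := by
    simp only [parseA]
    exact replace_filter _
  have hsteps' : ∀ ch ∈ (parseA data).2.2, ch = '>' ∨ ch = '<' ∨ ch = '^' ∨ ch = 'v' := by
    rw [hsA]
    intro ch hch
    have := List.all_eq_true.1 hsteps ch hch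
    simp only [Bool.or_eq_true, beq_iff_eq] at this
    tauto
  have h := fold_rel (parseA data).2.2 (parseA data).1 (parseA data).1
      ((parseA data).2.1.getD (0, 0)) hsteps' (parseA_nodup data) (parseA_vok data)
      (List.Perm.refl _)
  exact (gps_eq _ _ h.2.2.1 h.1).symm
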